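-- pv_equiv track=rewrite | github.com/Jonathan-Talvacchio/Pig_Latin_Translator | translate_to_pig.py | find_vowels
-- ===== SOURCE A (Python) =====
-- vowels = ['a', 'e', 'i', 'o', 'u']
--
-- def find_vowels(word_list_selected):
--     # --Reset num_consonants for next word--
--     num_consonants = 0
--     num_vowel = 0
--     # --Finds vowels--
--     for letter in ''.join(word_list_selected).lower():
--         if '{}'.format(letter) not in vowels:
--             num_consonants += 1
--         elif '{}'.format(letter) in vowels:
--             num_vowel += 1
--             return num_consonants, num_vowel
--     if num_vowel == 0:
--         return num_consonants, num_vowel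
-- ===== SOURCE B (Python) =====
-- def find_vowels(word_list_selected):
--     s = ''.join(word_list_selected).lower()
--     hits = [p for p in (s.find(v) for v in 'aeiou') if p != -1]
--     if hits:
--         return min(hits), 1
--     return len(s), 0
-- ===== Notes on version B (the rewrite author's own statement) =====
-- stated objective: alternative
-- what changed: Instead of a single left-to-right scan with an early return, B makes one s.find(v) pass per vowel, collects the found positions, and returns the minimum of those positions (or len(s) with 0 when no vowel is found).
import Mathlib
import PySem

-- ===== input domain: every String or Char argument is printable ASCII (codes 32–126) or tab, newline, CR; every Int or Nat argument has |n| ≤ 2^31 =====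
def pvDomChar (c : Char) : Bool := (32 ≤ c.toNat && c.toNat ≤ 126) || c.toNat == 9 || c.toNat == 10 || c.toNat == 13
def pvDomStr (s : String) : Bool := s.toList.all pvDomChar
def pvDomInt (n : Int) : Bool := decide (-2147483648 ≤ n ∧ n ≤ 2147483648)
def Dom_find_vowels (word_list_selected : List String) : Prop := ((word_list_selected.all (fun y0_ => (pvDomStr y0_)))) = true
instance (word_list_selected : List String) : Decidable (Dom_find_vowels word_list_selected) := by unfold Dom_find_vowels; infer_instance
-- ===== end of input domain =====

-- B replaces A's single early-return counting scan by one s.find(v) pass per vowel,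
-- taking the minimum found position (alternative decomposition; same asymptotic cost).

-- ===== PORT A =====
def vowelsA : List Char := ['a', 'e', 'i', 'o', 'u']

-- the for-loop of A: state (num_consonants, num_vowel); early return on a vowel.
-- After the loop num_vowel is 0, so the final 'if num_vowel == 0' branch is taken: return (nc, nv).
def findVowelsLoop : List Char → Int → Int → Int × Int
  | [], nc, nv => (nc, nv)
  | c :: rest, nc, nv =>
      if c ∉ vowelsA then findVowelsLoop rest (nc + 1) nv
      else (nc, nv + 1)

def find_vowels (word_list_selected : List String) : Int × Int :=
  findVowelsLoop (PySem.Chars.lower (PySem.Str.join "" word_list_selected).toList) 0 0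

-- ===== PORT B =====
-- hits = [p for p in (s.find(v) for v in 'aeiou') if p != -1]
def altHits (cs : List Char) : List Int :=
  (['a', 'e', 'i', 'o', 'u'].map (fun v => PySem.Chars.find cs [v])).filter (fun p => p ≠ -1)

def find_vowels_alt (word_list_selected : List String) : Int × Int :=
  let cs := PySem.Chars.lower (PySem.Str.join "" word_list_selected).toList
  let hits := altHits cs
  if hits ≠ [] then ((PySem.List.min? hits (fun x => x)).getD 0, 1)
  else ((cs.length : Int), 0)

-- ===== PRECONDITION & SPEC =====
def Spec_find_vowels (word_list_selected : List String) (out : Int × Int) : Prop := out = find_vowels_alt word_list_selected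
instance (word_list_selected : List String) (out : Int × Int) : Decidable (Spec_find_vowels word_list_selected out) := by unfold Spec_find_vowels; infer_instance

-- ===== CLAIM (what is proved, stated in full; the proofs are below) =====
def Claim_equal_find_vowels : Prop := ∀ (word_list_selected : List String), Dom_find_vowels word_list_selected → Spec_find_vowels word_list_selected (find_vowels word_list_selected)

-- ===== LEMMAS AND PROOFS =====

-- A's loop computes the index of the first vowel (or the length, with flag 0).
theorem findVowelsLoop_eq (l : List Char) (nc : Int) :
    findVowelsLoop l nc 0 =
      match l.findIdx? (fun c => c ∈ ['a', 'e', 'i', 'o', 'u']) with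
      | some i => (nc + (i : Int), 1)
      | none => (nc + (l.length : Int), 0) := by
  induction l generalizing nc with
  | nil => simp [findVowelsLoop]
  | cons c rest ih =>
    by_cases h : c ∈ vowelsA
    · have h' : (decide (c ∈ ['a', 'e', 'i', 'o', 'u'])) = true := by
        simpa [vowelsA] using h
      simp only [findVowelsLoop, h, not_true, List.findIdx?_cons, h', if_true,
        reduceIte]
      simp
    · have h' : (decide (c ∈ ['a', 'e', 'i', 'o', 'u'])) = false := by
        simpa [vowelsA] using h
      simp only [findVowelsLoop, h, not_false_iff, if_pos, List.findIdx?_cons, h',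
        Bool.false_eq_true, reduceIte, ih]
      cases rest.findIdx? (fun c => c ∈ ['a', 'e', 'i', 'o', 'u']) with
      | none => simp; ring
      | some i => simp; ring

-- [v] is a prefix of l iff l starts with v
theorem singleton_prefix_iff (a : Char) (l : List Char) : [a] <+: l ↔ l.head? = some a := by
  cases l <;> simp [List.prefix_cons_iff, eq_comm]

-- membership in altHits: exactly the per-vowel find results that are not -1
theorem mem_altHits (cs : List Char) (p : Int) :
    p ∈ altHits cs ↔ ∃ v ∈ ['a', 'e', 'i', 'o', 'u'], PySem.Chars.find cs [v] = p ∧ p ≠ -1 := by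
  simp only [altHits, List.mem_filter, List.mem_map, decide_not, Bool.not_eq_eq_eq_not,
    Bool.not_true, decide_eq_false_iff_not]
  aesop

-- a non-(-1) single-char find result points at the first occurrence of v
theorem find_single_spec (cs : List Char) (v : Char) (h : PySem.Chars.find cs [v] ≠ -1) :
    ∃ k : Nat, PySem.Chars.find cs [v] = (k : Int) ∧ cs[k]? = some v ∧
      ∀ j < k, cs[j]? ≠ some v := by
  have h0 : 0 ≤ PySem.Chars.find cs [v] := by
    have := PySem.Chars.neg_one_le_find (s := cs) (sub := [v])
    omega
  obtain ⟨hpre, hmin⟩ := PySem.Chars.find_spec (s := cs) (sub := [v]) h0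
  refine ⟨(PySem.Chars.find cs [v]).toNat, by omega, ?_, ?_⟩
  · have := (singleton_prefix_iff v _).mp hpre
    rwa [List.head?_drop] at this
  · intro j hj hv
    exact hmin j hj ((singleton_prefix_iff v _).mpr (by rwa [List.head?_drop]))

-- B's staged per-vowel finds also compute the first vowel index
theorem alt_core_eq (cs : List Char) :
    (if altHits cs ≠ [] then ((PySem.List.min? (altHits cs) (fun x => x)).getD 0, (1 : Int))
     else ((cs.length : Int), 0))
    = match cs.findIdx? (fun c => c ∈ ['a', 'e', 'i', 'o', 'u']) with
      | some i => ((i : Int), 1)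
      | none => ((cs.length : Int), 0) := by
  cases hfi : cs.findIdx? (fun c => c ∈ ['a', 'e', 'i', 'o', 'u']) with
  | none =>
    have hnone := List.findIdx?_eq_none_iff.mp hfi
    have hempty : altHits cs = [] := by
      rw [List.eq_nil_iff_forall_not_mem]
      intro p hp
      obtain ⟨v, hv, hfind, hne⟩ := (mem_altHits cs p).mp hp
      obtain ⟨k, hk, hget, _⟩ := find_single_spec cs v (hfind ▸ hne)
      have hmem : v ∈ cs := List.mem_of_getElem? hget
      have hf := hnone v hmem
      simp only [decide_eq_false_iff_not] at hf
      exact hf (by simpa using hv)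
    simp [hempty]
  | some i =>
    obtain ⟨hlt, hvow, hbefore⟩ := List.findIdx?_eq_some_iff_getElem.mp hfi
    have hne : PySem.Chars.find cs [cs[i]] ≠ -1 := by
      rw [PySem.Chars.find_ne_neg_one_iff, List.singleton_infix_iff]
      exact List.getElem_mem hlt
    obtain ⟨k, hk, hget, hmin⟩ := find_single_spec cs cs[i] hne
    have hklt : k < cs.length := (List.getElem?_eq_some_iff.mp hget).1
    have hki : k = i := by
      have hk_le : k ≤ i := by
        by_contra hc
        exact hmin i (by omega) (by simp [hlt])
      have hkvow : (decide (cs[k] ∈ ['a', 'e', 'i', 'o', 'u'])) = true := by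
        have heq : cs[k]'hklt = cs[i] := (List.getElem?_eq_some_iff.mp hget).2
        rw [heq]; exact hvow
      by_contra hc
      exact absurd hkvow (by simpa using hbefore k (by omega))
    have hi_mem : (i : Int) ∈ altHits cs := by
      rw [mem_altHits]
      exact ⟨cs[i], by simpa using hvow, by rw [hk, hki], by omega⟩
    have hlow : ∀ p ∈ altHits cs, (i : Int) ≤ p := by
      intro p hp
      obtain ⟨v, hv, hfind, hpne⟩ := (mem_altHits cs p).mp hp
      obtain ⟨k', hk', hget', _⟩ := find_single_spec cs v (hfind ▸ hpne)
      have hk'lt : k' < cs.length := (List.getElem?_eq_some_iff.mp hget').1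
      have hvk' : cs[k']'hk'lt = v := (List.getElem?_eq_some_iff.mp hget').2
      have hnotlt : ¬ k' < i := by
        intro hc
        exact absurd (show (decide (cs[k'] ∈ ['a', 'e', 'i', 'o', 'u'])) = true by
            rw [hvk']; simpa using hv)
          (by simpa using hbefore k' hc)
      rw [← hfind, hk']
      omega
    have hnonempty : altHits cs ≠ [] := fun h => by simp [h] at hi_mem
    have hmin_eq : PySem.List.min? (altHits cs) (fun x => x) = some (i : Int) := by
      cases hm : PySem.List.min? (altHits cs) (fun x => x) with
      | none => exact absurd ((PySem.List.min?_eq_none_iff _ _).mp hm) hnonempty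
      | some m =>
        have hmmem := PySem.List.min?_mem hm
        have h1 := hlow m hmmem
        have h2 := PySem.List.min?_isMin hm (i : Int) hi_mem
        simp only [Option.some.injEq]
        omega
    simp [hnonempty, hmin_eq]

-- ===== VERDICT (by name: the statement is the Claim_ definition above) =====
theorem find_vowels_spec : Claim_equal_find_vowels := by
  intro ws _
  unfold Spec_find_vowels find_vowels find_vowels_alt
  rw [findVowelsLoop_eq]
  show _ = (if altHits _ ≠ [] then _ else _)
  rw [alt_core_eq]
  cases (PySem.Chars.lower (PySem.Str.join "" ws).toList).findIdx?
      (fun c => c ∈ ['a', 'e', 'i', 'o', 'u']) <;> simp
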